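-- pv_equiv track=rewrite | github.com/pypi-data/pypi-mirror-384 | packages/mem8/mem8-6.0.0.tar.gz/mem8-6.0.0/backend/src/mem8_api/routers/search.py | _generate_excerpt
-- ===== SOURCE A (Python) =====
-- def _generate_excerpt(content: str, query: str, max_length: int = 200) -> str:
--     """Generate an excerpt from content highlighting the search query."""
--
--     if not query.strip():
--         return content[:max_length] + ("..." if len(content) > max_length else "")
--
--     query_lower = query.lower()
--     content_lower = content.lower()
--
--     # Find the first occurrence of any query term
--     query_terms = query_lower.split()
--     best_position = -1
--
--     for term in query_terms:
--         position = content_lower.find(term)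
--         if position != -1:
--             if best_position == -1 or position < best_position:
--                 best_position = position
--
--     if best_position == -1:
--         # No query terms found, return beginning
--         return content[:max_length] + ("..." if len(content) > max_length else "")
--
--     # Calculate excerpt boundaries
--     start = max(0, best_position - max_length // 3)
--     end = min(len(content), start + max_length)
--
--     excerpt = content[start:end]
--
--     # Add ellipsis if needed
--     if start > 0:
--         excerpt = "..." + excerpt
--     if end < len(content):
--         excerpt = excerpt + "..."
--
--     return excerpt
-- ===== SOURCE B (Python) =====
-- def _truncate(content, max_length):
--     return content[:max_length] + ("..." if len(content) > max_length else "")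
--
--
-- def _first_match(content_lower, terms):
--     """Leftmost index where any term starts, scanning content once; -1 if none."""
--     for i in range(len(content_lower)):
--         if any(content_lower.startswith(t, i) for t in terms):
--             return i
--     return -1
--
--
-- def _generate_excerpt(content: str, query: str, max_length: int = 200) -> str:
--     """Generate an excerpt from content highlighting the search query."""
--     if not query.strip():
--         return _truncate(content, max_length)
--
--     terms = query.lower().split()
--     best_position = _first_match(content.lower(), terms)
--
--     if best_position == -1:
--         return _truncate(content, max_length)
--
--     start = max(0, best_position - max_length // 3)
--     end = min(len(content), start + max_length)
--     excerpt = content[start:end]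
--     if start > 0:
--         excerpt = "..." + excerpt
--     if end < len(content):
--         excerpt = excerpt + "..."
--     return excerpt
-- ===== Notes on version B (the rewrite author's own statement) =====
-- stated objective: alternative
-- what changed: A loops over the query terms calling str.find on the whole content and tracks the minimum position; B scans the content once left-to-right and stops at the first index where any term starts (and factors the shared truncation tail into a helper).
import Mathlib
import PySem

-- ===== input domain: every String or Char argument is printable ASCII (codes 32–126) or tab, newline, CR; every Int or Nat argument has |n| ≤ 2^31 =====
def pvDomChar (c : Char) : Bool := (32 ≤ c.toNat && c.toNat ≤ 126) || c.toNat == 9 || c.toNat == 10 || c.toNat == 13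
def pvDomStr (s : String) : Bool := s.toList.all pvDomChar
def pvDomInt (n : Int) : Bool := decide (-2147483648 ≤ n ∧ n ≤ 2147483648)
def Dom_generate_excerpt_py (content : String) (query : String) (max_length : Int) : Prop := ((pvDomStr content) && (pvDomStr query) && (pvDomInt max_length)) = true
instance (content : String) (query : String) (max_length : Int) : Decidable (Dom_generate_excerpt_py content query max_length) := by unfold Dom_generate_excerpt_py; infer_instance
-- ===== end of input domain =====

-- B replaces A's per-term find/min-tracking loop with a single left-to-right scan of the
-- content for the leftmost position where any query term starts (objective: alternative).


-- ===== PORT A =====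
-- literal transliteration of A on the character lists; the per-term loop is the foldl
def genExcerptA (c : List Char) (q : List Char) (m : Int) : List Char :=
  if (PySem.Chars.strip q).isEmpty then
    PySem.List.slice c none (some m) ++ (if (c.length : Int) > m then ['.', '.', '.'] else [])
  else
    let query_lower := PySem.Chars.lower q
    let content_lower := PySem.Chars.lower c
    let query_terms := PySem.Chars.split₀ query_lower
    let best_position := query_terms.foldl (fun best term =>
      let position := PySem.Chars.find content_lower term
      if position ≠ -1 then
        if best = -1 ∨ position < best then position else best
      else best) (-1)
    if best_position = -1 then
      PySem.List.slice c none (some m) ++ (if (c.length : Int) > m then ['.', '.', '.'] else [])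
    else
      let start := max 0 (best_position - PySem.Int.floordiv m 3)
      let stop := min (c.length : Int) (start + m)
      let excerpt := PySem.List.slice c (some start) (some stop)
      let excerpt := if start > 0 then ['.', '.', '.'] ++ excerpt else excerpt
      let excerpt := if stop < (c.length : Int) then excerpt ++ ['.', '.', '.'] else excerpt
      excerpt

def generate_excerpt_py (content : String) (query : String) (max_length : Int) : String :=
  String.mk (genExcerptA content.toList query.toList max_length)

-- ===== PORT B =====
-- _truncate: content[:max_length] + ("..." if len(content) > max_length else "")
def pvTruncate (c : List Char) (m : Int) : List Char :=
  PySem.List.slice c none (some m) ++ (if (c.length : Int) > m then ['.', '.', '.'] else [])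

-- _first_match's 'for i in range(len(content_lower))' loop: recursion over the suffix
-- carrying the index i; content_lower.startswith(t, i) is t.isPrefixOf (current suffix) —
-- exact for the 0 ≤ i ≤ len positions the loop visits
def pvFirstMatchGo (terms : List (List Char)) (i : Nat) : List Char → Int
  | [] => -1
  | ch :: rest => if terms.any (fun t => t.isPrefixOf (ch :: rest)) then (i : Int)
                  else pvFirstMatchGo terms (i + 1) rest

def genExcerptB (c : List Char) (q : List Char) (m : Int) : List Char :=
  if (PySem.Chars.strip q).isEmpty then
    pvTruncate c m
  else
    let terms := PySem.Chars.split₀ (PySem.Chars.lower q)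
    let best_position := pvFirstMatchGo terms 0 (PySem.Chars.lower c)
    if best_position = -1 then
      pvTruncate c m
    else
      let start := max 0 (best_position - PySem.Int.floordiv m 3)
      let stop := min (c.length : Int) (start + m)
      let excerpt := PySem.List.slice c (some start) (some stop)
      let excerpt := if start > 0 then ['.', '.', '.'] ++ excerpt else excerpt
      let excerpt := if stop < (c.length : Int) then excerpt ++ ['.', '.', '.'] else excerpt
      excerpt

def generate_excerpt_py_alt (content : String) (query : String) (max_length : Int) : String :=
  String.mk (genExcerptB content.toList query.toList max_length)

-- ===== PRECONDITION & SPEC =====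
def Spec_generate_excerpt_py (content : String) (query : String) (max_length : Int) (out : String) : Prop := out = generate_excerpt_py_alt content query max_length
instance (content : String) (query : String) (max_length : Int) (out : String) : Decidable (Spec_generate_excerpt_py content query max_length out) := by unfold Spec_generate_excerpt_py; infer_instance

-- ===== CLAIM (what is proved, stated in full; the proofs are below) =====
def Claim_equal_generate_excerpt_py : Prop := ∀ (content : String) (query : String) (max_length : Int), Dom_generate_excerpt_py content query max_length → Spec_generate_excerpt_py content query max_length (generate_excerpt_py content query max_length)

-- ===== LEMMAS AND PROOFS =====

-- every word produced by str.split() is a nonempty string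
theorem split₀_go_mem_ne_nil (s : List Char) : ∀ (cur : List Char) (acc : List (List Char)),
    (∀ x ∈ acc, x ≠ []) → ∀ t ∈ PySem.Chars.split₀.go s cur acc, t ≠ [] := by
  induction s with
  | nil =>
      intro cur acc hacc t ht
      rw [PySem.Chars.split₀.go] at ht
      by_cases hc : cur.isEmpty
      · simp only [hc, if_pos, List.mem_reverse] at ht
        exact hacc t ht
      · simp only [hc, if_neg, Bool.false_eq_true, not_false_iff, List.mem_reverse,
          List.mem_cons] at ht
        rcases ht with h | h
        · subst h; simpa [List.isEmpty_iff] using hc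
        · exact hacc t h
  | cons ch rest ih =>
      intro cur acc hacc t ht
      rw [PySem.Chars.split₀.go] at ht
      by_cases hsp : PySem.Chars.isspace ch
      · by_cases hc : cur.isEmpty
        · simp only [hsp, hc, if_pos] at ht
          exact ih [] acc hacc t ht
        · simp only [hsp, hc, if_pos, if_neg, Bool.false_eq_true, not_false_iff] at ht
          refine ih [] (cur.reverse :: acc) ?_ t ht
          intro x hx
          rcases List.mem_cons.mp hx with h | h
          · subst h; simpa [List.isEmpty_iff] using hc
          · exact hacc x h
      · simp only [hsp, Bool.false_eq_true, if_neg, not_false_iff] at ht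
        exact ih (ch :: cur) acc hacc t ht

theorem split₀_mem_ne_nil (q : List Char) : ∀ t ∈ PySem.Chars.split₀ q, t ≠ [] := by
  intro t ht
  exact split₀_go_mem_ne_nil q [] [] (by simp) t ht

-- the body of A's per-term loop, named so the invariant can speak about it
def pvStepA (cl : List Char) (best : Int) (term : List Char) : Int :=
  let position := PySem.Chars.find cl term
  if position ≠ -1 then
    if best = -1 ∨ position < best then position else best
  else best

-- invariant of A's loop: the fold's result is -1 exactly when no term occurs, otherwise it is
-- one of the find values and is ≤ every non-(-1) find value
theorem foldA_spec (cl : List Char) : ∀ (ts : List (List Char)) (b : Int),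
    (ts.foldl (pvStepA cl) b = -1 → b = -1 ∧ ∀ t ∈ ts, PySem.Chars.find cl t = -1) ∧
    (b ≠ -1 → ts.foldl (pvStepA cl) b ≤ b ∧ ts.foldl (pvStepA cl) b ≠ -1) ∧
    (∀ t ∈ ts, PySem.Chars.find cl t ≠ -1 →
      ts.foldl (pvStepA cl) b ≤ PySem.Chars.find cl t ∧ ts.foldl (pvStepA cl) b ≠ -1) ∧
    (ts.foldl (pvStepA cl) b ≠ -1 →
      ts.foldl (pvStepA cl) b = b ∨ ∃ t ∈ ts, ts.foldl (pvStepA cl) b = PySem.Chars.find cl t) := by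
  intro ts
  induction ts with
  | nil => intro b; simp
  | cons t0 rest ih =>
      intro b
      have hstep : List.foldl (pvStepA cl) b (t0 :: rest) = List.foldl (pvStepA cl) (pvStepA cl b t0) rest := by
        simp [List.foldl]
      obtain ⟨ih1, ih2, ih3, ih4⟩ := ih (pvStepA cl b t0)
      have hcase : pvStepA cl b t0 = PySem.Chars.find cl t0 ∨ pvStepA cl b t0 = b := by
        unfold pvStepA
        by_cases hp : PySem.Chars.find cl t0 = -1
        · simp [hp]
        · simp only [hp, ne_eq, not_false_iff, if_pos]
          split_ifs <;> simp
      have hle0 : pvStepA cl b t0 ≤ b ∨ b = -1 := by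
        unfold pvStepA
        by_cases hp : PySem.Chars.find cl t0 = -1
        · simp [hp]
        · simp only [hp, ne_eq, not_false_iff, if_pos]
          split_ifs with h
          · rcases h with h | h
            · right; exact h
            · left; omega
          · left; exact le_refl b
      have hne0 : PySem.Chars.find cl t0 ≠ -1 →
          pvStepA cl b t0 ≤ PySem.Chars.find cl t0 ∧ pvStepA cl b t0 ≠ -1 := by
        intro hfnd
        have := PySem.Chars.neg_one_le_find cl t0
        unfold pvStepA
        simp only [hfnd, ne_eq, not_false_iff, if_pos]
        split_ifs with h
        · exact ⟨le_refl _, hfnd⟩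
        · push_neg at h; exact ⟨by omega, by omega⟩
      have hbne : b ≠ -1 → pvStepA cl b t0 ≠ -1 := by
        intro hb
        have := PySem.Chars.neg_one_le_find cl t0
        unfold pvStepA
        by_cases hp : PySem.Chars.find cl t0 = -1
        · simp [hp]; exact hb
        · simp only [hp, ne_eq, not_false_iff, if_pos]
          split_ifs with h <;> omega
      refine ⟨?_, ?_, ?_, ?_⟩
      · intro hres
        rw [hstep] at hres
        obtain ⟨hb1, hall⟩ := ih1 hres
        have hfb : PySem.Chars.find cl t0 = -1 ∧ b = -1 := by
          by_cases hp : PySem.Chars.find cl t0 = -1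
          · refine ⟨hp, ?_⟩
            unfold pvStepA at hb1; simpa [hp] using hb1
          · exact absurd hb1 ((hne0 hp).2)
        refine ⟨hfb.2, ?_⟩
        intro t ht
        rcases List.mem_cons.mp ht with h | h
        · subst h; exact hfb.1
        · exact hall t h
      · intro hb
        rw [hstep]
        obtain ⟨h1, h2⟩ := ih2 (hbne hb)
        rcases hle0 with h | h
        · exact ⟨le_trans h1 h, h2⟩
        · exact absurd h hb
      · intro t ht hfnd
        rcases List.mem_cons.mp ht with h | h
        · subst h
          rw [hstep]
          obtain ⟨hs1, hs2⟩ := hne0 hfnd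
          obtain ⟨h1, h2⟩ := ih2 hs2
          exact ⟨le_trans h1 hs1, h2⟩
        · rw [hstep]; exact ih3 t h hfnd
      · intro hres
        rw [hstep] at hres
        rw [hstep]
        rcases ih4 hres with h | ⟨t, ht, heq⟩
        · rcases hcase with hc | hc
          · right; exact ⟨t0, List.mem_cons_self, by rw [h, hc]⟩
          · left; rw [h, hc]
        · right; exact ⟨t, List.mem_cons_of_mem _ ht, heq⟩

-- B's scan returns -1 when no term occurs anywhere in the string
theorem fm_none (terms : List (List Char)) : ∀ (s : List Char) (i : Nat),
    (∀ t ∈ terms, ¬ t <:+: s) → pvFirstMatchGo terms i s = -1 := by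
  intro s
  induction s with
  | nil => intro i _; rfl
  | cons ch rest ih =>
      intro i h
      rw [pvFirstMatchGo]
      have hany : terms.any (fun t => t.isPrefixOf (ch :: rest)) = false := by
        simp only [List.any_eq_false]
        intro t ht
        simp only [Bool.not_eq_true, List.isPrefixOf_iff_prefix]
        intro hp
        exact h t ht hp.isInfix
      rw [hany]
      simp only [Bool.false_eq_true, if_neg, not_false_iff]
      exact ih (i + 1) (fun t ht hinf => h t ht (hinf.trans (List.suffix_cons ch rest).isInfix))

-- B's scan returns i + k when k is the first position where some term starts
theorem fm_found (terms : List (List Char)) : ∀ (s : List Char) (i k : Nat),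
    k < s.length → (∃ t ∈ terms, t <+: s.drop k) →
    (∀ j, j < k → ∀ t ∈ terms, ¬ t <+: s.drop j) →
    pvFirstMatchGo terms i s = ((i + k : Nat) : Int) := by
  intro s
  induction s with
  | nil => intro i k hk; simp at hk
  | cons ch rest ih =>
      intro i k hk hex hmin
      rw [pvFirstMatchGo]
      cases k with
      | zero =>
          have hany : terms.any (fun t => t.isPrefixOf (ch :: rest)) = true := by
            obtain ⟨t, ht, hp⟩ := hex
            simp only [List.any_eq_true]
            exact ⟨t, ht, List.isPrefixOf_iff_prefix.mpr (by simpa using hp)⟩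
          rw [hany]
          simp
      | succ k' =>
          have hany : terms.any (fun t => t.isPrefixOf (ch :: rest)) = false := by
            simp only [List.any_eq_false]
            intro t ht
            simp only [Bool.not_eq_true, List.isPrefixOf_iff_prefix]
            intro hp
            exact hmin 0 (Nat.succ_pos k') t ht (by simpa using hp)
          rw [hany]
          simp only [Bool.false_eq_true, if_neg, not_false_iff]
          have := ih (i + 1) k' (by simpa using Nat.lt_of_succ_lt_succ hk)
            (by simpa using hex)
            (fun j hj t ht => by
              have := hmin (j + 1) (Nat.succ_lt_succ hj) t ht
              simpa using this)
          rw [this]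
          congr 1
          omega

-- the heart of the equivalence: for nonempty terms, the leftmost scan position equals
-- A's running minimum of the per-term find results
theorem best_eq (cl : List Char) (ts : List (List Char)) (hne : ∀ t ∈ ts, t ≠ []) :
    pvFirstMatchGo ts 0 cl = ts.foldl (pvStepA cl) (-1) := by
  obtain ⟨h1, _, h3, h4⟩ := foldA_spec cl ts (-1)
  by_cases hr : ts.foldl (pvStepA cl) (-1) = -1
  · rw [hr]
    refine fm_none ts cl 0 ?_
    intro t ht
    exact (PySem.Chars.find_eq_neg_one_iff cl t).mp ((h1 hr).2 t ht)
  · rcases h4 hr with h | ⟨t0, ht0, heq⟩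
    · exact absurd h hr
    · have hfnd0 : PySem.Chars.find cl t0 ≠ -1 := by rw [← heq]; exact hr
      have hpos : 0 ≤ PySem.Chars.find cl t0 := by
        have := PySem.Chars.neg_one_le_find cl t0; omega
      obtain ⟨hpre, hmin⟩ := PySem.Chars.find_spec hpos
      have hresle : ∀ t ∈ ts, PySem.Chars.find cl t ≠ -1 →
          PySem.Chars.find cl t0 ≤ PySem.Chars.find cl t := by
        intro t ht hf
        have := (h3 t ht hf).1; omega
      set k := (PySem.Chars.find cl t0).toNat with hk
      have hklen : k < cl.length := by
        have hdne : cl.drop k ≠ [] := by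
          intro hnil
          rw [hnil, List.prefix_nil] at hpre
          exact hne t0 ht0 hpre
        have := List.drop_eq_nil_iff.not.mp (by simpa using hdne)
        omega
      have := fm_found ts cl 0 k hklen ⟨t0, ht0, hpre⟩ ?_
      · rw [this, heq]
        simp [hk, Int.toNat_of_nonneg hpos]
      · intro j hj t ht hp
        by_cases hf : PySem.Chars.find cl t = -1
        · have : ¬ t <:+: cl := (PySem.Chars.find_eq_neg_one_iff cl t).mp hf
          exact this (hp.isInfix.trans (List.drop_suffix j cl).isInfix)
        · obtain ⟨_, hmin'⟩ := PySem.Chars.find_spec (s := cl) (sub := t) (by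
            have := PySem.Chars.neg_one_le_find cl t; omega)
          refine hmin' j ?_ hp
          have hle := hresle t ht hf
          omega

theorem genExcerpt_eq (c q : List Char) (m : Int) : genExcerptA c q m = genExcerptB c q m := by
  unfold genExcerptA genExcerptB pvTruncate
  by_cases hq : (PySem.Chars.strip q).isEmpty
  · rw [if_pos hq, if_pos hq]
  · rw [if_neg hq, if_neg hq]
    have hb := best_eq (PySem.Chars.lower c) (PySem.Chars.split₀ (PySem.Chars.lower q))
      (split₀_mem_ne_nil _)
    exact (congrArg (fun bp : Int =>
      if bp = -1 then
        PySem.List.slice c none (some m) ++ (if (c.length : Int) > m then ['.', '.', '.'] else [])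
      else
        let start := max 0 (bp - PySem.Int.floordiv m 3)
        let stop := min (c.length : Int) (start + m)
        let excerpt := PySem.List.slice c (some start) (some stop)
        let excerpt := if start > 0 then ['.', '.', '.'] ++ excerpt else excerpt
        if stop < (c.length : Int) then excerpt ++ ['.', '.', '.'] else excerpt) hb).symm

-- ===== VERDICT (by name: the statement is the Claim_ definition above) =====
theorem generate_excerpt_py_spec : Claim_equal_generate_excerpt_py := by
  intro content query max_length _
  unfold Spec_generate_excerpt_py generate_excerpt_py generate_excerpt_py_alt
  rw [genExcerpt_eq]
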